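-- pv_equiv track=rewrite | github.com/asmaaabbassi/PDS | final_project/trading_methodologies/missing_value.py | previous_neighbor
-- ===== SOURCE A (Python) =====
-- def previous_neighbor(L, n):
--     m = 0
--     j = 0
--     for i, x in enumerate(L):
--         if x < n and x > m:
--             m = x
--             j = i
--     return j
-- ===== SOURCE B (Python) =====
-- def previous_neighbor(L, n):
--     # Sort-then-select: rank the qualifying (index, value) pairs by value in
--     # descending order; Python's sort is stable, so among equal values the
--     # earliest index comes first, matching A's earliest-index tie-breaking.
--     cands = [(i, x) for i, x in enumerate(L) if 0 < x < n]
--     ranked = sorted(cands, key=lambda t: t[1], reverse=True)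
--     return ranked[0][0] if ranked else 0
-- ===== Notes on version B (the rewrite author's own statement) =====
-- stated objective: alternative
-- what changed: Replaces A's single running-max accumulator scan with a sort-then-select algorithm: collect the qualifying (index, value) pairs, stably sort them by value in descending order, and return the head's index (stability reproduces A's earliest-index tie-breaking).
import Mathlib
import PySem

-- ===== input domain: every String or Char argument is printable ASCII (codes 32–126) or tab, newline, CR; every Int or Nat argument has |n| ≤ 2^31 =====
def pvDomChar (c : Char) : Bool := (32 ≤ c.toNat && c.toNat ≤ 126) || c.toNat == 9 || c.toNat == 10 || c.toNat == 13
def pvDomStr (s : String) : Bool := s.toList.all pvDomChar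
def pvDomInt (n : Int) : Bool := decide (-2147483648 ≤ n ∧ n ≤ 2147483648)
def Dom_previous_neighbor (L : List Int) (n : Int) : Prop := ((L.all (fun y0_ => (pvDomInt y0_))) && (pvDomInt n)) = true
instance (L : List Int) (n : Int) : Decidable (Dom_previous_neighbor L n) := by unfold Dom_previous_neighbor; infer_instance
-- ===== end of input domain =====

-- B replaces A's running-max accumulator scan by sort-then-select: qualifying
-- (index, value) pairs are stably sorted by value descending and the head's
-- index is returned (alternative algorithm; not claimed faster).

-- ===== PORT A =====
def previous_neighbor (L : List Int) (n : Int) : Int :=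
  ((PySem.List.enumerate L).foldl
    (fun (s : Int × Int) (p : Int × Int) =>
      if p.2 < n ∧ p.2 > s.1 then (p.2, p.1) else s) ((0 : Int), (0 : Int))).2

-- ===== PORT B =====
-- comprehension [(i, x) for i, x in enumerate(L) if 0 < x < n] ported as a filter;
-- sorted(cands, key=lambda t: t[1], reverse=True) is PySem.List.sorted (stable)
def previous_neighbor_alt (L : List Int) (n : Int) : Int :=
  let cands := (PySem.List.enumerate L).filter (fun p => decide (0 < p.2 ∧ p.2 < n))
  let ranked := PySem.List.sorted cands (fun t => t.2) true
  match ranked with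
  | [] => 0
  | t :: _ => t.1

-- ===== PRECONDITION & SPEC =====
def Spec_previous_neighbor (L : List Int) (n : Int) (out : Int) : Prop := out = previous_neighbor_alt L n
instance (L : List Int) (n : Int) (out : Int) : Decidable (Spec_previous_neighbor L n out) := by unfold Spec_previous_neighbor; infer_instance

-- ===== CLAIM (what is proved, stated in full; the proofs are below) =====
def Claim_equal_previous_neighbor : Prop := ∀ (L : List Int) (n : Int), Dom_previous_neighbor L n → Spec_previous_neighbor L n (previous_neighbor L n)

-- ===== LEMMAS AND PROOFS =====

-- running first-maximal step on (index, value) pairs, key = value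
def pvGmax (u v : Int × Int) : Int × Int := if u.2 < v.2 then v else u

-- head of a stable descending insertion fold is the first maximal element
theorem pv_head_foldl_insert :
    ∀ (l : List (Int × Int)) (h : Int × Int) (t : List (Int × Int)),
    (l.foldl
        (fun acc x => PySem.List.insertBy (fun a b => decide (b.2 < a.2)) x acc)
        (h :: t)).head? = some (l.foldl pvGmax h) := by
  intro l
  induction l with
  | nil => intro h t; rfl
  | cons x l ih =>
      intro h t
      simp only [List.foldl_cons]
      by_cases hlt : h.2 < x.2
      · have : PySem.List.insertBy (fun a b => decide (b.2 < a.2)) x (h :: t)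
            = x :: h :: t := by
          simp [PySem.List.insertBy, hlt]
        rw [this, ih, show pvGmax h x = x by simp [pvGmax, hlt]]
      · have : PySem.List.insertBy (fun a b => decide (b.2 < a.2)) x (h :: t)
            = h :: PySem.List.insertBy (fun a b => decide (b.2 < a.2)) x t := by
          simp [PySem.List.insertBy, hlt]
        rw [this, ih, show pvGmax h x = h by simp [pvGmax, hlt]]

-- the descending stable sort of a nonempty list starts with the first maximum
theorem pv_head_sorted (q : Int × Int) (rest : List (Int × Int)) :
    (PySem.List.sorted (q :: rest) (fun t => t.2) true).head?
      = some (rest.foldl pvGmax q) := by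
  simp only [PySem.List.sorted, List.foldl_cons]
  simp only [if_true]
  have hq : PySem.List.insertBy (fun a b : Int × Int => decide (b.2 < a.2)) q [] = [q] := rfl
  rw [hq]
  exact pv_head_foldl_insert rest q []

theorem pv_foldl_filter_drop (n m x : Int) (t : List (Int × Int)) :
    ∀ (a : Int × Int), x ≤ a.2 → m < x →
    (t.filter (fun p => decide (m < p.2 ∧ p.2 < n))).foldl pvGmax a
      = (t.filter (fun p => decide (x < p.2 ∧ p.2 < n))).foldl pvGmax a := by
  induction t with
  | nil => intro a _ _; rfl
  | cons p t ih =>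
      intro a hxa hmx
      by_cases hq : x < p.2 ∧ p.2 < n
      · have hm : m < p.2 ∧ p.2 < n := ⟨lt_trans hmx hq.1, hq.2⟩
        rw [List.filter_cons_of_pos (by simpa using hm),
          List.filter_cons_of_pos (by simpa using hq), List.foldl_cons, List.foldl_cons]
        have hle : x ≤ (pvGmax a p).2 := by
          unfold pvGmax; split
          · exact le_of_lt hq.1
          · exact hxa
        exact ih (pvGmax a p) hle hmx
      · by_cases hm : m < p.2 ∧ p.2 < n
        · have hpx : p.2 ≤ x := by
            rcases hm with ⟨_, hn⟩
            by_contra hlt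
            exact hq ⟨lt_of_not_ge hlt, hn⟩
          have hga : pvGmax a p = a := by
            unfold pvGmax
            have hnlt : ¬ a.2 < p.2 := not_lt.mpr (le_trans hpx hxa)
            simp [hnlt]
          rw [List.filter_cons_of_pos (by simpa using hm),
            List.filter_cons_of_neg (by simpa using hq), List.foldl_cons, hga]
          exact ih a hxa hmx
        · rw [List.filter_cons_of_neg (by simpa using hm),
            List.filter_cons_of_neg (by simpa using hq)]
          exact ih a hxa hmx

-- A's accumulate loop over pairs equals a filter followed by a first-max fold
theorem pv_key (n : Int) : ∀ (ps : List (Int × Int)) (m j : Int),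
    ps.foldl
      (fun (s : Int × Int) (p : Int × Int) =>
        if p.2 < n ∧ p.2 > s.1 then (p.2, p.1) else s) (m, j)
    = (match ps.filter (fun p => decide (m < p.2 ∧ p.2 < n)) with
       | [] => (m, j)
       | q :: rest => ((rest.foldl pvGmax q).2, (rest.foldl pvGmax q).1)) := by
  intro ps
  induction ps with
  | nil => intro m j; rfl
  | cons p t ih =>
      intro m j
      simp only [List.foldl_cons]
      by_cases h : p.2 < n ∧ p.2 > m
      · have hm : m < p.2 ∧ p.2 < n := ⟨h.2, h.1⟩
        have hfil : List.filter (fun p => decide (m < p.2 ∧ p.2 < n)) (p :: t)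
            = p :: List.filter (fun p => decide (m < p.2 ∧ p.2 < n)) t := by
          simp [hm]
        rw [if_pos h, ih p.2 p.1, hfil]
        have hdrop := pv_foldl_filter_drop n m p.2 t p (le_refl p.2) h.2
        dsimp only
        rw [hdrop]
        cases hcase : t.filter (fun q => decide (p.2 < q.2 ∧ q.2 < n)) with
        | nil => rfl
        | cons q rest =>
            have hqmem : q ∈ t.filter (fun q => decide (p.2 < q.2 ∧ q.2 < n)) := by
              rw [hcase]; exact List.mem_cons_self
            have hq : p.2 < q.2 ∧ q.2 < n := by
              have := List.of_mem_filter hqmem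
              simpa using this
            have hswap : pvGmax p q = q := by
              unfold pvGmax; simp [hq.1]
            dsimp only
            rw [List.foldl_cons, hswap]
      · have hm : ¬ (m < p.2 ∧ p.2 < n) := fun hc => h ⟨hc.2, hc.1⟩
        have hfil : List.filter (fun p => decide (m < p.2 ∧ p.2 < n)) (p :: t)
            = List.filter (fun p => decide (m < p.2 ∧ p.2 < n)) t := by
          simp [hm]
        rw [if_neg h, ih m j, hfil]

-- ===== VERDICT (by name: the statement is the Claim_ definition above) =====
theorem previous_neighbor_spec : Claim_equal_previous_neighbor := by
  intro L n _
  unfold Spec_previous_neighbor previous_neighbor previous_neighbor_alt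
  rw [pv_key n (PySem.List.enumerate L) 0 0]
  cases hcase : (PySem.List.enumerate L).filter
      (fun p => decide ((0 : Int) < p.2 ∧ p.2 < n)) with
  | nil => simp [PySem.List.sorted]
  | cons q rest =>
      have hhead := pv_head_sorted q rest
      cases hs : PySem.List.sorted (q :: rest) (fun t => t.2) true with
      | nil => simp [hs] at hhead
      | cons h t' =>
          rw [hs] at hhead
          simp only [List.head?_cons, Option.some.injEq] at hhead
          simp [hs, hhead]
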